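-- pv_equiv track=rewrite | github.com/MoyalShoham/Agent | crepty-agent-v2/trading_bot/utils/alpha_signal_stacker.py | stack_alpha_signals
-- ===== SOURCE A (Python) =====
-- def stack_alpha_signals(signals_dict):
--     # signals_dict: {'technical': x, 'ml': y, 'sentiment': z, ...}
--     score = 0
--     for v in signals_dict.values():
--         if v == 'buy':
--             score += 1
--         elif v == 'sell':
--             score -= 1
--     return score
-- ===== SOURCE B (Python) =====
-- def stack_alpha_signals(signals_dict):
--     # Histogram the votes once, then read off the two entries.
--     freq = {}
--     for v in signals_dict.values():
--         freq[v] = freq.get(v, 0) + 1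
--     return freq.get('buy', 0) - freq.get('sell', 0)
-- ===== Notes on version B (the rewrite author's own statement) =====
-- stated objective: alternative
-- what changed: Replaces A's branching score accumulator with a different data structure: one pass builds a frequency dictionary of all vote values, and the net score is then read off as two dictionary lookups (freq['buy'] - freq['sell']).
import Mathlib
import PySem

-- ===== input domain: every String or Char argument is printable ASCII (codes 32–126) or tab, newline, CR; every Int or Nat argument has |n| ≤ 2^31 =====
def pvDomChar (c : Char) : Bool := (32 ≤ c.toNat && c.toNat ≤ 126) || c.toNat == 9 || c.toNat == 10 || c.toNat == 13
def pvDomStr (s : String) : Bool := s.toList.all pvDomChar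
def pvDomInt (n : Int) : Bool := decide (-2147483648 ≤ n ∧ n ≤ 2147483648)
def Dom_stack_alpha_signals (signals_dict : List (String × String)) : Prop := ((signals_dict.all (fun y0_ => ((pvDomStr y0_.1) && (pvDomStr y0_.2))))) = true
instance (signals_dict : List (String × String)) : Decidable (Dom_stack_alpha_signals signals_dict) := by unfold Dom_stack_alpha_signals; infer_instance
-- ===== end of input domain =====

-- B builds a frequency dictionary of the vote values in one pass, then reads the net score off as two lookups (alternative data structure, same cost).

-- ===== PORT A =====
-- score = 0; for v in values: if v == 'buy': +=1 elif v == 'sell': -=1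
def stack_alpha_signals (signals_dict : List (String × String)) : Int :=
  ((PySem.Dict.ofList signals_dict).values).foldl
    (fun score v => if v == "buy" then score + 1 else if v == "sell" then score - 1 else score) 0

-- ===== PORT B =====
-- freq = {}; for v in values: freq[v] = freq.get(v, 0) + 1; return freq.get('buy',0) - freq.get('sell',0)
def stack_alpha_signals_alt (signals_dict : List (String × String)) : Int :=
  let vals := (PySem.Dict.ofList signals_dict).values
  let freq : PySem.Dict String Int :=
    vals.foldl (fun d v => d.modify v 0 (· + 1)) PySem.Dict.empty
  freq.getD "buy" 0 - freq.getD "sell" 0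

-- ===== PRECONDITION & SPEC =====
def Spec_stack_alpha_signals (signals_dict : List (String × String)) (out : Int) : Prop := out = stack_alpha_signals_alt signals_dict
instance (signals_dict : List (String × String)) (out : Int) : Decidable (Spec_stack_alpha_signals signals_dict out) := by unfold Spec_stack_alpha_signals; infer_instance

-- ===== CLAIM =====
def Claim_equal_stack_alpha_signals : Prop := ∀ (signals_dict : List (String × String)), Dom_stack_alpha_signals signals_dict → Spec_stack_alpha_signals signals_dict (stack_alpha_signals signals_dict)

-- ===== LEMMAS AND PROOFS =====
theorem stack_foldl_eq_counts (l : List String) (a : Int) :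
    l.foldl (fun score v => if v == "buy" then score + 1 else if v == "sell" then score - 1 else score) a
      = a + (l.count "buy" : Int) - (l.count "sell" : Int) := by
  induction l generalizing a with
  | nil => simp
  | cons x xs ih =>
    simp only [List.foldl_cons, ih, List.count_cons]
    by_cases hb : x == "buy" <;> by_cases hs : x == "sell" <;>
      simp_all <;> omega

-- ===== VERDICT =====
theorem stack_alpha_signals_spec : Claim_equal_stack_alpha_signals := by
  intro sd _
  unfold Spec_stack_alpha_signals stack_alpha_signals stack_alpha_signals_alt
  dsimp only
  rw [stack_foldl_eq_counts, ← PySem.Dict.counter_eq_foldl, PySem.Dict.getD_counter,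
    PySem.Dict.getD_counter]
  ring
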